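-- pv_equiv track=rewrite | github.com/jannikw/aoc-2019 | day22/part2.py | repeat_steps
-- ===== SOURCE A (Python) =====
-- size = 119315717514047
--
-- def compose(f, g):
--     return (f[0] * g[0] % size, (f[0] * g[1] + f[1]) % size)
--
-- def repeat_steps(f, n):
--     r = (1, 0)
--
--     while n > 0:
--         if n % 2 == 1:
--             r = compose(r, f)
--             n = n - 1
--         else:
--             f = compose(f, f)
--             n = n // 2
--
--     return r
-- ===== SOURCE B (Python) =====
-- size = 119315717514047
--
-- def compose(f, g):
--     return (f[0] * g[0] % size, (f[0] * g[1] + f[1]) % size)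
--
-- def repeat_steps(f, n):
--     # divide-and-conquer exponentiation of the affine map f (mod size)
--     if n <= 0:
--         return (1, 0)
--     half = repeat_steps(f, n // 2)
--     r = compose(half, half)
--     if n % 2 == 1:
--         r = compose(r, f)
--     return r
-- ===== Notes on version B (the rewrite author's own statement) =====
-- stated objective: alternative
-- what changed: Replaced A's iterative bit-by-bit while loop that mutates r, f and n with a recursive divide-and-conquer exponentiation: recurse on n//2, square the result, and compose once more with f when n is odd.
import Mathlib
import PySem

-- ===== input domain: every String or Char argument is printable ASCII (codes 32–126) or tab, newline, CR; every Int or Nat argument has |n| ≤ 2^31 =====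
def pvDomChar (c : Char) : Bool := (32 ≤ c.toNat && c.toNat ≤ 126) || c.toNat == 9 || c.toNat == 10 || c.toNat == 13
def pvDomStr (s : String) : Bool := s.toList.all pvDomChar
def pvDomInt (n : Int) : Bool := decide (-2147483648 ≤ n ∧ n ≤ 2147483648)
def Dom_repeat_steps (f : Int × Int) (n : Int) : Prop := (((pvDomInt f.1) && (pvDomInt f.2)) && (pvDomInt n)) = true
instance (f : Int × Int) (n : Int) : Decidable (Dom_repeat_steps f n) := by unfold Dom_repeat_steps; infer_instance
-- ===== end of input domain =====

-- B replaces A's iterative bit-by-bit loop with recursive divide-and-conquer exponentiation (objective: alternative decomposition, same cost).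

def pvSize : Int := 119315717514047

def compose (f g : Int × Int) : Int × Int :=
  (PySem.Int.mod (f.1 * g.1) pvSize, PySem.Int.mod (f.1 * g.2 + f.2) pvSize)

-- ===== PORT A =====
def repeat_stepsLoop (r f : Int × Int) (n : Int) : Int × Int :=
  if 0 < n then
    if PySem.Int.mod n 2 = 1 then repeat_stepsLoop (compose r f) f (n - 1)
    else repeat_stepsLoop r (compose f f) (PySem.Int.floordiv n 2)
  else r
termination_by n.toNat
decreasing_by
  · omega
  · rw [PySem.Int.floordiv_eq_ediv_of_pos (by omega)]; omega

def repeat_steps (f : Int × Int) (n : Int) : Int × Int :=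
  repeat_stepsLoop (1, 0) f n

-- ===== PORT B =====
def repeat_steps_alt (f : Int × Int) (n : Int) : Int × Int :=
  if n ≤ 0 then (1, 0)
  else
    let half := repeat_steps_alt f (PySem.Int.floordiv n 2)
    let r := compose half half
    if PySem.Int.mod n 2 = 1 then compose r f else r
termination_by n.toNat
decreasing_by
  rw [PySem.Int.floordiv_eq_ediv_of_pos (by omega)]; omega

-- ===== PRECONDITION & SPEC =====
def Spec_repeat_steps (f : Int × Int) (n : Int) (out : Int × Int) : Prop := out = repeat_steps_alt f n
instance (f : Int × Int) (n : Int) (out : Int × Int) : Decidable (Spec_repeat_steps f n out) := by unfold Spec_repeat_steps; infer_instance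

-- ===== CLAIM (what is proved, stated in full; the proofs are below) =====
def Claim_equal_repeat_steps : Prop := ∀ (f : Int × Int) (n : Int), Dom_repeat_steps f n → Spec_repeat_steps f n (repeat_steps f n)

-- ===== LEMMAS AND PROOFS =====

theorem pvSize_pos : (0 : Int) < pvSize := by norm_num [pvSize]

theorem pmod_eq (a : Int) : PySem.Int.mod a pvSize = a % pvSize :=
  PySem.Int.mod_eq_emod_of_pos pvSize_pos

theorem compose_def (f g : Int × Int) :
    compose f g = ((f.1 * g.1) % pvSize, (f.1 * g.2 + f.2) % pvSize) := by
  simp [compose, pmod_eq]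

theorem me (a : Int) : (a % pvSize) ≡ a [ZMOD pvSize] :=
  Int.emod_emod_of_dvd a dvd_rfl

theorem compose_assoc (a b c : Int × Int) :
    compose (compose a b) c = compose a (compose b c) := by
  simp only [compose_def, Prod.mk.injEq]
  constructor
  · exact ((me (a.1 * b.1)).mul_right c.1).trans
      (by rw [mul_assoc]; exact (((me (b.1 * c.1)).mul_left a.1)).symm)
  · have L : (a.1 * b.1 % pvSize * c.2 + (a.1 * b.2 + a.2) % pvSize) ≡
        a.1 * b.1 * c.2 + (a.1 * b.2 + a.2) [ZMOD pvSize] :=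
      ((me (a.1 * b.1)).mul_right c.2).add (me (a.1 * b.2 + a.2))
    have R : (a.1 * ((b.1 * c.2 + b.2) % pvSize) + a.2) ≡
        a.1 * (b.1 * c.2 + b.2) + a.2 [ZMOD pvSize] :=
      ((me (b.1 * c.2 + b.2)).mul_left a.1).add_right a.2
    have E : a.1 * b.1 * c.2 + (a.1 * b.2 + a.2) = a.1 * (b.1 * c.2 + b.2) + a.2 := by ring
    exact L.trans (E ▸ R.symm)

def powA (f : Int × Int) : Nat → Int × Int
  | 0 => (1, 0)
  | k + 1 => compose (powA f k) f

theorem powA_reduced (f : Int × Int) (k : Nat) :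
    (powA f k).1 % pvSize = (powA f k).1 ∧ (powA f k).2 % pvSize = (powA f k).2 := by
  cases k with
  | zero => constructor <;> norm_num [powA, pvSize]
  | succ k =>
    simp only [powA, compose_def]
    exact ⟨Int.emod_emod_of_dvd _ dvd_rfl, Int.emod_emod_of_dvd _ dvd_rfl⟩

theorem compose_id_right (a : Int × Int) (h1 : a.1 % pvSize = a.1) (h2 : a.2 % pvSize = a.2) :
    compose a (1, 0) = a := by
  simp only [compose_def, mul_one, mul_zero, zero_add, h1, h2]

theorem powA_add (f : Int × Int) (a b : Nat) :
    compose (powA f a) (powA f b) = powA f (a + b) := by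
  induction b with
  | zero => exact compose_id_right _ (powA_reduced f a).1 (powA_reduced f a).2
  | succ b ih =>
    show compose (powA f a) (compose (powA f b) f) = compose (powA f (a + b)) f
    rw [← compose_assoc, ih]

theorem compose_reduce_left (f g : Int × Int) :
    compose f g = compose (f.1 % pvSize, f.2 % pvSize) g := by
  simp only [compose_def, Prod.mk.injEq]
  constructor
  · exact (((me f.1).mul_right g.1)).symm
  · exact (((me f.1).mul_right g.2).add (me f.2)).symm

theorem powA_one (f : Int × Int) : powA f 1 = (f.1 % pvSize, f.2 % pvSize) := by
  simp [powA, compose_def]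

theorem compose_pow_comm (f : Int × Int) (k : Nat) :
    compose f (powA f k) = powA f (k + 1) := by
  rw [compose_reduce_left, ← powA_one, powA_add, Nat.add_comm]

theorem powA_sq (f : Int × Int) (k : Nat) :
    powA (compose f f) k = powA f (2 * k) := by
  induction k with
  | zero => rfl
  | succ k ih =>
    have h : 2 * (k + 1) = (2 * k + 1) + 1 := by ring
    rw [h]
    show compose (powA (compose f f) k) (compose f f) = compose (powA f (2 * k + 1)) f
    rw [ih]
    show compose (powA f (2 * k)) (compose f f) = compose (compose (powA f (2 * k)) f) f
    rw [compose_assoc]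

theorem loopA_eq : ∀ (k : Nat) (n : Int), n.toNat ≤ k → ∀ (r f : Int × Int),
    r.1 % pvSize = r.1 → r.2 % pvSize = r.2 →
    repeat_stepsLoop r f n = compose r (powA f n.toNat) := by
  intro k
  induction k with
  | zero =>
    intro n hn r f h1 h2
    rw [repeat_stepsLoop]
    have hnp : ¬ 0 < n := by omega
    simp only [hnp, if_false]
    have : n.toNat = 0 := by omega
    rw [this]
    exact (compose_id_right r h1 h2).symm
  | succ k ih =>
    intro n hn r f h1 h2
    rw [repeat_stepsLoop]
    by_cases hp : 0 < n
    · simp only [hp, if_true]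
      by_cases hodd : PySem.Int.mod n 2 = 1
      · simp only [hodd, if_true]
        rw [PySem.Int.mod_eq_emod_of_pos (by omega)] at hodd
        have hred := powA_reduced f 1
        rw [powA_one] at hred
        have hcrf : (compose r f).1 % pvSize = (compose r f).1 ∧
            (compose r f).2 % pvSize = (compose r f).2 := by
          simp only [compose_def]
          exact ⟨Int.emod_emod_of_dvd _ dvd_rfl, Int.emod_emod_of_dvd _ dvd_rfl⟩
        rw [ih (n - 1) (by omega) (compose r f) f hcrf.1 hcrf.2]
        rw [compose_assoc, compose_pow_comm]
        have hN : (n - 1).toNat + 1 = n.toNat := by omega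
        rw [hN]
      · simp only [hodd, if_false]
        rw [PySem.Int.mod_eq_emod_of_pos (by omega)] at hodd
        rw [PySem.Int.floordiv_eq_ediv_of_pos (by omega)]
        rw [ih (n / 2) (by omega) r (compose f f) h1 h2]
        rw [powA_sq]
        have hN : 2 * (n / 2).toNat = n.toNat := by omega
        rw [hN]
    · simp only [hp, if_false]
      have : n.toNat = 0 := by omega
      rw [this]
      exact (compose_id_right r h1 h2).symm

theorem altB_eq : ∀ (k : Nat) (n : Int), n.toNat ≤ k → ∀ (f : Int × Int),
    repeat_steps_alt f n = powA f n.toNat := by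
  intro k
  induction k with
  | zero =>
    intro n hn f
    rw [repeat_steps_alt]
    have h0 : n ≤ 0 := by omega
    simp only [h0, if_true]
    have : n.toNat = 0 := by omega
    rw [this]; rfl
  | succ k ih =>
    intro n hn f
    rw [repeat_steps_alt]
    by_cases h0 : n ≤ 0
    · simp only [h0, if_true]
      have : n.toNat = 0 := by omega
      rw [this]; rfl
    · simp only [h0, if_false]
      rw [PySem.Int.floordiv_eq_ediv_of_pos (by omega)]
      rw [ih (n / 2) (by omega) f]
      rw [powA_add]
      by_cases hodd : PySem.Int.mod n 2 = 1
      · simp only [hodd, if_true]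
        rw [PySem.Int.mod_eq_emod_of_pos (by omega)] at hodd
        show compose (powA f ((n / 2).toNat + (n / 2).toNat)) f = powA f n.toNat
        have : n.toNat = ((n / 2).toNat + (n / 2).toNat) + 1 := by omega
        rw [this]; rfl
      · simp only [hodd, if_false]
        rw [PySem.Int.mod_eq_emod_of_pos (by omega)] at hodd
        have hN : (n / 2).toNat + (n / 2).toNat = n.toNat := by omega
        rw [hN]

theorem compose_id_left (g : Int × Int) (h1 : g.1 % pvSize = g.1) (h2 : g.2 % pvSize = g.2) :
    compose (1, 0) g = g := by
  simp [compose_def, h1, h2]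

theorem repeat_steps_eq_pow (f : Int × Int) (n : Int) :
    repeat_steps f n = powA f n.toNat := by
  rw [repeat_steps,
    loopA_eq n.toNat n le_rfl (1, 0) f (by norm_num [pvSize]) (by norm_num [pvSize])]
  exact compose_id_left _ (powA_reduced f n.toNat).1 (powA_reduced f n.toNat).2

-- ===== VERDICT (by name: the statement is the Claim_ definition above) =====
theorem repeat_steps_spec : Claim_equal_repeat_steps := by
  intro f n _
  unfold Spec_repeat_steps
  rw [repeat_steps_eq_pow, altB_eq n.toNat n le_rfl f]
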